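-- pv_equiv track=rewrite | github.com/patriciomartinns/pdf-toolbox | src/pdf_toolbox/services/pdf_reader.py | _normalize_row_text
-- ===== SOURCE A (Python) =====
-- from typing import Any, Literal, Sequence, cast
--
-- def _normalize_row_text(
--     raw_rows: list[list[Any]],
--     row_count: int,
--     column_count: int,
-- ) -> list[list[str]]:
--     normalized: list[list[str]] = []
--     for row in raw_rows[:row_count]:
--         cell_values: list[Any] = list(row)
--         clean_values = [_clean_cell_text(value) for value in cell_values[:column_count]]
--         while len(clean_values) < column_count:
--             clean_values.append("")
--         normalized.append(clean_values)
--
--     while len(normalized) < row_count: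
--         normalized.append([""] * column_count)
--     return normalized
--
-- def _clean_cell_text(value: Any) -> str:
--     if value is None:
--         return ""
--     return str(value).strip()
-- ===== SOURCE B (Python) =====
-- def _clean_cell_text(value):
--     if value is None:
--         return ""
--     return str(value).strip()
--
--
-- def _normalize_row_text(raw_rows, row_count, column_count):
--     # Build the grid cell-by-cell over the target shape; out-of-range cells are "".
--     def cell(i, j):
--         if i < len(raw_rows):
--             row = raw_rows[i]
--             if j < len(row):
--                 return _clean_cell_text(row[j])
--         return ""
--
--     return [[cell(i, j) for j in range(column_count)] for i in range(row_count)]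
-- ===== Notes on version B (the rewrite author's own statement) =====
-- stated objective: simpler
-- what changed: B builds the row_count x column_count grid directly by index with a uniform bounds check per cell, replacing A's slice-truncate, per-row while-padding and final row while-padding with a single comprehension over the target shape; Pre_ excludes only negative-count inputs where Python's negative-slice semantics make A keep truncated data.
-- outside the precondition, e.g. on _normalize_row_text([['a'], ['b']], -1, 1): A returns [['a']], B returns []; on _normalize_row_text([['a', 'b']], 1, -1): A returns [['a']], B returns [[]]
import Mathlib
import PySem

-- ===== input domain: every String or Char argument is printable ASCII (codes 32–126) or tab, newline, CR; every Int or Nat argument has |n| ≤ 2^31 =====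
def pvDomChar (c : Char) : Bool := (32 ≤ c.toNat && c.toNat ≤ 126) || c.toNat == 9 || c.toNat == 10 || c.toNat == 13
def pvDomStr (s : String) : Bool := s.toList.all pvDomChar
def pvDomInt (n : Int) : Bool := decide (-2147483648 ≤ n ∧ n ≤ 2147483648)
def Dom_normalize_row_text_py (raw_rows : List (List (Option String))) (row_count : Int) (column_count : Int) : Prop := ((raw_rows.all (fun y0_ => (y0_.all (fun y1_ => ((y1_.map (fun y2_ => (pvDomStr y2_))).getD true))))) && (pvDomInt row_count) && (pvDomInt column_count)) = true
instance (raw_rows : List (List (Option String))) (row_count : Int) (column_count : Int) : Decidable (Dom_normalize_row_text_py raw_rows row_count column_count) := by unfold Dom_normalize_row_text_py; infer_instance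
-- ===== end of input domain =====

-- B builds the output grid directly by index with one bounds check per cell (objective: simpler);
-- same return value as A on all non-negative row/column counts.

-- ===== PORT A =====

-- _clean_cell_text: None -> "", else str(value).strip() (value is already a string on our domain)
def pv_clean (v : Option String) : String :=
  match v with
  | none => ""
  | some s => PySem.Str.strip s

-- the shape of both of A's while-loops: append `fill` until the length reaches `target`
def pv_padTo {α : Type} (target : Int) (fill : α) (l : List α) : List α :=
  if _h : (l.length : Int) < target then pv_padTo target fill (l ++ [fill]) else l
termination_by (target - l.length).toNat
decreasing_by simp; omega

def normalize_row_text_py (raw_rows : List (List (Option String))) (row_count : Int) (column_count : Int) : List (List String) :=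
  -- for row in raw_rows[:row_count]: clean row[:column_count], pad with "" to column_count, append
  let normalized : List (List String) :=
    (PySem.List.slice raw_rows none (some row_count)).foldl
      (fun acc row =>
        acc ++ [pv_padTo column_count ""
                  ((PySem.List.slice row none (some column_count)).map pv_clean)]) []
  -- while len(normalized) < row_count: append [""] * column_count
  -- ([""] * column_count ports to List.replicate column_count.toNat "": empty for column_count < 0, exactly as Python)
  pv_padTo row_count (List.replicate column_count.toNat "") normalized

-- ===== PORT B =====

def pv_cell (raw_rows : List (List (Option String))) (i j : Nat) : String :=
  match raw_rows[i]? with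
  | some row =>
    match row[j]? with
    | some v => pv_clean v
    | none => ""
  | none => ""

def normalize_row_text_py_alt (raw_rows : List (List (Option String))) (row_count : Int) (column_count : Int) : List (List String) :=
  -- [[cell(i, j) for j in range(column_count)] for i in range(row_count)]
  (List.range row_count.toNat).map (fun i =>
    (List.range column_count.toNat).map (fun j => pv_cell raw_rows i j))

-- ===== PRECONDITION & SPEC =====
-- Pre_ excludes only the negative-count inputs on which Python's negative-slice semantics make A keep
-- truncated data (rows/cells dropped from the end) — an accident outside the natural domain of the
-- function; B treats a negative count as an empty target shape there.
def Pre_normalize_row_text_py (raw_rows : List (List (Option String))) (row_count : Int) (column_count : Int) : Prop :=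
  (0 ≤ row_count ∨ (raw_rows.length : Int) + row_count ≤ 0) ∧
  (0 ≤ column_count ∨ ∀ row ∈ raw_rows.take row_count.toNat, (row.length : Int) + column_count ≤ 0)
instance (raw_rows : List (List (Option String))) (row_count : Int) (column_count : Int) : Decidable (Pre_normalize_row_text_py raw_rows row_count column_count) := by unfold Pre_normalize_row_text_py; infer_instance

def pvWitness_normalize_row_text_py : List (List (Option String)) × Int × Int :=
  ([[some " a ", none], [some "b"]], 3, 2)

def Spec_normalize_row_text_py (raw_rows : List (List (Option String))) (row_count : Int) (column_count : Int) (out : List (List String)) : Prop := out = normalize_row_text_py_alt raw_rows row_count column_count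
instance (raw_rows : List (List (Option String))) (row_count : Int) (column_count : Int) (out : List (List String)) : Decidable (Spec_normalize_row_text_py raw_rows row_count column_count out) := by unfold Spec_normalize_row_text_py; infer_instance

-- ===== CLAIM (what is proved, stated in full; the proofs are below) =====
def Claim_equal_normalize_row_text_py : Prop := ∀ (raw_rows : List (List (Option String))) (row_count : Int) (column_count : Int), Dom_normalize_row_text_py raw_rows row_count column_count → Pre_normalize_row_text_py raw_rows row_count column_count → Spec_normalize_row_text_py raw_rows row_count column_count (normalize_row_text_py raw_rows row_count column_count)

-- ===== LEMMAS AND PROOFS =====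

-- pv_padTo appends exactly (target.toNat - length) copies of fill
theorem pv_padTo_eq {α : Type} (fill : α) :
    ∀ (n : Nat) (t : Int) (l : List α), t.toNat - l.length = n →
      pv_padTo t fill l = l ++ List.replicate n fill := by
  intro n
  induction n with
  | zero =>
    intro t l h
    rw [pv_padTo]
    have : ¬ ((l.length : Int) < t) := by omega
    simp [this]
  | succ n ih =>
    intro t l h
    rw [pv_padTo]
    have hlt : (l.length : Int) < t := by omega
    have := ih t (l ++ [fill]) (by simp; omega)
    simp [hlt, this, List.replicate_succ]

-- xs[:b] for negative b that reaches before the start is empty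
theorem pv_slice_neg_empty {α : Type} (xs : List α) (b : Int) (hb : b < 0)
    (h : (xs.length : Int) + b ≤ 0) : PySem.List.slice xs none (some b) = [] := by
  have hk : b = -(((-b).toNat : Nat) : Int) := by omega
  rw [hk, PySem.List.slice_to_neg_natCast xs (-b).toNat (by omega)]
  have h0 : xs.length - (-b).toNat = 0 := by omega
  rw [h0, List.take_zero]

-- one row of A equals one row of B
theorem pv_row_eq (row : List (Option String)) (cc : Int) (hcc : 0 ≤ cc) (raw_rows : List (List (Option String))) (i : Nat) (hi : raw_rows[i]? = some row) :
    pv_padTo cc "" ((PySem.List.slice row none (some cc)).map pv_clean)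
      = (List.range cc.toNat).map (fun j => pv_cell raw_rows i j) := by
  rw [PySem.List.slice_to row hcc]
  rw [pv_padTo_eq "" (cc.toNat - ((row.take cc.toNat).map pv_clean).length) cc _ rfl]
  apply List.ext_getElem
  · simp only [List.length_append, List.length_map, List.length_take, List.length_replicate,
      List.length_range]
    omega
  · intro j h1 h2
    simp only [List.length_map, List.length_range] at h2
    by_cases hj : j < min cc.toNat row.length
    · rw [List.getElem_append_left (by simp only [List.length_map, List.length_take]; omega)]
      have hg : row[j]? = some row[j] := List.getElem?_eq_getElem (by omega)
      simp [pv_cell, hi, hg]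
    · rw [List.getElem_append_right (by simp only [List.length_map, List.length_take]; omega)]
      have hnone : row[j]? = none := List.getElem?_eq_none_iff.mpr (by omega)
      simp [pv_cell, hi, hnone]

-- ===== VERDICT (by name: the statement is the Claim_ definition above) =====
theorem normalize_row_text_py_spec : Claim_equal_normalize_row_text_py := by
  intro raw_rows rc cc _ hpre
  obtain ⟨hr, hc⟩ := hpre
  unfold Spec_normalize_row_text_py normalize_row_text_py normalize_row_text_py_alt
  by_cases hrc : 0 ≤ rc
  · rw [PySem.List.slice_to raw_rows hrc]
    rw [PySem.List.foldl_append_singleton_eq_map]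
    simp only [List.nil_append]
    by_cases hcc : 0 ≤ cc
    · -- both counts non-negative: the main case
      rw [pv_padTo_eq _ (rc.toNat - ((raw_rows.take rc.toNat).map
            (fun row => pv_padTo cc "" ((PySem.List.slice row none (some cc)).map pv_clean))).length)
          rc _ rfl]
      apply List.ext_getElem
      · simp only [List.length_append, List.length_map, List.length_take, List.length_replicate,
          List.length_range]
        omega
      · intro i h1 h2
        simp only [List.length_map, List.length_range] at h2
        simp only [List.getElem_map, List.getElem_range]
        by_cases hi : i < min rc.toNat raw_rows.length
        · rw [List.getElem_append_left (by simp only [List.length_map, List.length_take]; omega)]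
          simp only [List.getElem_map, List.getElem_take]
          exact pv_row_eq raw_rows[i] cc hcc raw_rows i (List.getElem?_eq_getElem (by omega))
        · rw [List.getElem_append_right (by simp only [List.length_map, List.length_take]; omega)]
          have hir : raw_rows[i]? = none := List.getElem?_eq_none_iff.mpr (by omega)
          simp [pv_cell, hir, List.map_const']
    · -- row_count ≥ 0, column_count < 0: every admitted row is emptied on both sides
      have hall := hc.resolve_left hcc
      have hmap : (raw_rows.take rc.toNat).map
          (fun row => pv_padTo cc "" ((PySem.List.slice row none (some cc)).map pv_clean))
          = (raw_rows.take rc.toNat).map (fun _ => ([] : List String)) := by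
        apply List.map_congr_left
        intro row hrow
        rw [pv_slice_neg_empty row cc (by omega) (hall row hrow), List.map_nil,
          pv_padTo_eq "" 0 cc [] (by simp; omega), List.nil_append, List.replicate_zero]
      rw [hmap, List.map_const']
      have hccz : cc.toNat = 0 := by omega
      rw [hccz, List.replicate_zero,
        pv_padTo_eq ([] : List String) (rc.toNat - (raw_rows.take rc.toNat).length)
          rc _ (by simp)]
      simp only [List.replicate_append_replicate, List.length_take, List.range_zero,
        List.map_nil, List.map_const', List.length_range]
      have hsum : min rc.toNat raw_rows.length + (rc.toNat - min rc.toNat raw_rows.length)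
          = rc.toNat := by omega
      rw [hsum]
  · -- row_count < 0 and the slice keeps nothing: both sides are the empty grid
    have hlen := hr.resolve_left hrc
    rw [pv_slice_neg_empty raw_rows rc (by omega) hlen]
    have hrz : rc.toNat = 0 := by omega
    rw [hrz]
    simp only [List.foldl_nil, List.range_zero, List.map_nil]
    rw [pv_padTo_eq _ 0 rc [] (by simp; omega), List.nil_append, List.replicate_zero]
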